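-- pv_equiv track=rewrite | github.com/pypi-data/pypi-mirror-373 | packages/foldeverything/foldeverything-0.0.0-py3-none-any.whl/foldeverything/data/select/protein_new.py | next_label
-- ===== SOURCE A (Python) =====
-- def next_label(label):
--     """Generate the next lexicographical string in a base-26 system."""
--     if not label:
--         return "A"
--
--     label = list(label)  # Convert string to list of characters
--     i = len(label) - 1
--
--     while i >= 0:
--         if label[i] != "Z":  # Increment current character
--             label[i] = chr(ord(label[i]) + 1)
--             return "".join(label)
--         label[i] = "A"  # Reset to 'A' if it was 'Z'
--         i -= 1
--
--     return "A" + "".join(label)  # Prepend 'A' if all were 'Z'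
-- ===== SOURCE B (Python) =====
-- def next_label(label):
--     """Generate the next lexicographical string in a base-26 system."""
--     stripped = label.rstrip('Z')
--     if not stripped:
--         return "A" * (len(label) + 1)
--     return stripped[:-1] + chr(ord(stripped[-1]) + 1) + "A" * (len(label) - len(stripped))
-- ===== Notes on version B (the rewrite author's own statement) =====
-- stated objective: simpler
-- what changed: Replaces the explicit right-to-left carry loop (mutating a char list) with one C-level rstrip of the trailing run of the carry letter, a single bump of the last remaining character, and string concatenation.
import Mathlib
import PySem

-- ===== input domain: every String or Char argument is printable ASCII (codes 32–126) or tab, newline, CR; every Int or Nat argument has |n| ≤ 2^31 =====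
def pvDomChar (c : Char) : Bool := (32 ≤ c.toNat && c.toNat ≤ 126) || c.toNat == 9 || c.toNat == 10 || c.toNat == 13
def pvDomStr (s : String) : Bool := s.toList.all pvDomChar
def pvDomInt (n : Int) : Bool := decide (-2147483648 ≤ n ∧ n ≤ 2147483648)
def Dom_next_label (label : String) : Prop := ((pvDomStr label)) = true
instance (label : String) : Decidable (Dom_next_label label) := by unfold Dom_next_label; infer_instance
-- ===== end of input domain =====

-- B replaces A's right-to-left carry loop with rstrip('Z') + one character bump (simpler decomposition, same cost).


-- ===== PORT A =====
-- A's while-loop, scanning from index len-1 downwards: modelled as structural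
-- recursion over the REVERSED character list; some r = loop returned "".join,
-- none = the loop fell off the left end (all chars were 'Z', each reset to 'A').
def pvBumpRev : List Char → Option (List Char)
  | [] => none
  | c :: rest =>
    if c ≠ 'Z' then some (Char.ofNat (c.toNat + 1) :: rest)   -- label[i] = chr(ord(label[i]) + 1); return
    else (pvBumpRev rest).map (fun r => 'A' :: r)             -- label[i] = 'A'; i -= 1

def next_label (label : String) : String :=
  if label.toList = [] then "A"
  else
    match pvBumpRev label.toList.reverse with
    | some r => String.ofList r.reverse
    | none => String.ofList ('A' :: List.replicate label.toList.length 'A')  -- "A" + "".join(label), all reset to 'A'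

-- ===== PORT B =====
def next_label_alt (label : String) : String :=
  let l := label.toList
  -- label.rstrip('Z'): exact hand port of rstrip with the single char 'Z'
  let stripped := (l.reverse.dropWhile (· == 'Z')).reverse
  if stripped = [] then String.ofList (List.replicate (l.length + 1) 'A')
  else String.ofList (stripped.dropLast ++ [Char.ofNat (stripped.getLast!.toNat + 1)]
        ++ List.replicate (l.length - stripped.length) 'A')

-- ===== PRECONDITION & SPEC =====
def Spec_next_label (label : String) (out : String) : Prop := out = next_label_alt label
instance (label : String) (out : String) : Decidable (Spec_next_label label out) := by unfold Spec_next_label; infer_instance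

-- ===== CLAIM (what is proved, stated in full; the proofs are below) =====
def Claim_equal_next_label : Prop := ∀ (label : String), Dom_next_label label → Spec_next_label label (next_label label)

-- ===== LEMMAS AND PROOFS =====

-- A's result, as a list, as a function of the reversed input list
def pvFromA (r : List Char) : List Char :=
  match pvBumpRev r with
  | some out => out.reverse
  | none => 'A' :: List.replicate r.length 'A'

-- B's result, as a list, as a function of the reversed input list
def pvFromB (r : List Char) : List Char :=
  let d := r.dropWhile (· == 'Z')
  if d = [] then List.replicate (r.length + 1) 'A'
  else d.reverse.dropLast ++ [Char.ofNat (d.reverse.getLast!.toNat + 1)]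
        ++ List.replicate (r.length - d.length) 'A'

lemma pvFromA_Z (rest : List Char) : pvFromA ('Z' :: rest) = pvFromA rest ++ ['A'] := by
  cases h : pvBumpRev rest with
  | none => simp [pvFromA, pvBumpRev, h, List.replicate_succ']
  | some out => simp [pvFromA, pvBumpRev, h]

lemma pvFromB_Z (rest : List Char) : pvFromB ('Z' :: rest) = pvFromB rest ++ ['A'] := by
  have hle := List.length_dropWhile_le (p := (· == 'Z')) (l := rest)
  cases h : rest.dropWhile (· == 'Z') with
  | nil => simp [pvFromB, List.dropWhile, h, List.replicate_succ']
  | cons x xs =>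
    rw [h] at hle; simp only [List.length_cons] at hle
    have h1 : rest.length - xs.length = rest.length - (xs.length + 1) + 1 := by omega
    simp [pvFromB, List.dropWhile, h, h1, List.replicate_succ']

lemma pvFromA_eq_pvFromB (r : List Char) : pvFromA r = pvFromB r := by
  induction r with
  | nil => simp [pvFromA, pvFromB, pvBumpRev]
  | cons c rest ih =>
    by_cases hc : c = 'Z'
    · subst hc; rw [pvFromA_Z, pvFromB_Z, ih]
    · have hc' : (c == 'Z') = false := by simp [hc]
      simp [pvFromA, pvFromB, pvBumpRev, hc, hc', List.dropWhile]

lemma next_label_eq_fromA (label : String) :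
    next_label label = String.ofList (pvFromA label.toList.reverse) := by
  unfold next_label pvFromA
  rcases hl : label.toList with _ | ⟨c, cs⟩
  · simp [pvBumpRev]
  · cases h : pvBumpRev ((c :: cs).reverse) <;> simp

lemma next_label_alt_eq_fromB (label : String) :
    next_label_alt label = String.ofList (pvFromB label.toList.reverse) := by
  unfold next_label_alt pvFromB
  by_cases h : label.toList.reverse.dropWhile (· == 'Z') = [] <;>
    simp [h]

-- ===== VERDICT (by name: the statement is the Claim_ definition above) =====
theorem next_label_spec : Claim_equal_next_label := by
  intro label _
  unfold Spec_next_label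
  rw [next_label_eq_fromA, next_label_alt_eq_fromB, pvFromA_eq_pvFromB]
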